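-- pv_equiv track=rewrite | github.com/Yeaaahhhhh/kaggle-nfl-data-big | Code/fatigue_estimate.py | calculate_continuity
-- ===== SOURCE A (Python) =====
-- from collections import defaultdict, OrderedDict
--
-- def calculate_continuity(player_data, plays_info):
--     """
--     Calculate the number of consecutive plays each player has participated in.
--
--     Args:
--         player_data (defaultdict): Dictionary mapping (gameId, playId) to list of (nflId, teamAbbr).
--         plays_info (dict): Dictionary mapping (gameId, playId) to (possessionTeam, defensiveTeam).
--
--     Returns:
--         OrderedDict: A dictionary mapping "gameId_playId" to a dictionary of {nflId: continuity_count}.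
--     """
--
--     game_plays = defaultdict(list)
--     for (gameId, playId) in plays_info.keys():
--         game_plays[gameId].append(playId)
--     for gameId in game_plays:
--         game_plays[gameId].sort(key=lambda x: int(x))
--
--     final_result = OrderedDict()
--     player_continuity = {}  # {(gameId, nflId): continuity_count}
--     prev_possession_team = {}
--
--     for gameId in game_plays:
--         player_continuity.clear()
--         prev_possession_team[gameId] = None
--
--         for playId in game_plays[gameId]:
--             possessionTeam, _ = plays_info[(gameId, playId)]
--             players = player_data.get((gameId, playId), [])
--             current_continuity = {}
--
--             # Determine offense-defense switch
--             if possessionTeam != prev_possession_team[gameId]: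
--                 player_continuity.clear()
--
--             for nflId, teamAbbr in players:
--                 key = (gameId, nflId)
--                 if key in player_continuity:
--                     player_continuity[key] += 1
--                 else:
--                     player_continuity[key] = 1
--
--                 current_continuity[nflId] = player_continuity[key]
--
--             final_result[f"{gameId}_{playId}"] = current_continuity
--             prev_possession_team[gameId] = possessionTeam
--
--     return final_result
-- ===== SOURCE B (Python) =====
-- from collections import defaultdict, OrderedDict
--
--
-- def _segments(gameId, playIds, plays_info):
--     """Split the sorted playIds into maximal consecutive runs sharing one possessionTeam."""
--     segs = []
--     rest = playIds
--     while rest: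
--         poss = plays_info[(gameId, rest[0])][0]
--         k = 1
--         while k < len(rest) and plays_info[(gameId, rest[k])][0] == poss:
--             k += 1
--         segs.append(rest[:k])
--         rest = rest[k:]
--     return segs
--
--
-- def calculate_continuity(player_data, plays_info):
--     game_plays = defaultdict(list)
--     for (gameId, playId) in plays_info.keys():
--         game_plays[gameId].append(playId)
--
--     final_result = OrderedDict()
--     for gameId, playIds in game_plays.items():
--         playIds.sort(key=int)
--         for seg in _segments(gameId, playIds, plays_info):
--             counts = {}  # {nflId: consecutive-play count within this possession run}
--             for playId in seg:
--                 current = {}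
--                 for nflId, _teamAbbr in player_data.get((gameId, playId), []):
--                     c = counts.get(nflId, 0) + 1
--                     counts[nflId] = c
--                     current[nflId] = c
--                 final_result[f"{gameId}_{playId}"] = current
--     return final_result
-- ===== Notes on version B (the rewrite author's own statement) =====
-- stated objective: alternative
-- what changed: Replaces A's single sweep with inline prev_possession_team tracking and dict.clear() resets (and a (gameId,nflId)-keyed running dict) by an explicit two-level decomposition: each game's sorted playIds are first segmented into maximal runs of one possessionTeam, then each segment is counted independently with a fresh nflId-keyed counts dict.
import Mathlib
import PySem

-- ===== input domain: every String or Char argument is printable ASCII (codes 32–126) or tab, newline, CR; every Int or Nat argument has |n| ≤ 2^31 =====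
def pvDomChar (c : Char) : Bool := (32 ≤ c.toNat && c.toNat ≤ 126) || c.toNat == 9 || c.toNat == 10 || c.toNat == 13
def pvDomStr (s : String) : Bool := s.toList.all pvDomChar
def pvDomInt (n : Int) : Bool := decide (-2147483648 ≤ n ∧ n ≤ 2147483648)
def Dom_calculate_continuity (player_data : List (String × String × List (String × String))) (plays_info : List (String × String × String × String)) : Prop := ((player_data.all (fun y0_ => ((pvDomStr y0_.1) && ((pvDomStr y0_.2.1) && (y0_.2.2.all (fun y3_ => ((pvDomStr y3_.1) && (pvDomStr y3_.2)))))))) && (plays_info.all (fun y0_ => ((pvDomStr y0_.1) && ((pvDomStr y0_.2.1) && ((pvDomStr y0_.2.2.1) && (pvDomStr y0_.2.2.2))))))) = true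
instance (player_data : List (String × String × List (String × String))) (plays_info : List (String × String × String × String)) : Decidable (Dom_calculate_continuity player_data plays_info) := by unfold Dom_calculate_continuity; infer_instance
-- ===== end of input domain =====

-- B replaces A's single sweep with prev-possession tracking and dict.clear() resets by an explicit
-- decomposition: segment each game's sorted playIds into maximal one-possession runs, then count each
-- run independently with a fresh nflId-keyed dict (objective: alternative; same asymptotic cost).


-- Helpers shared by both ports: they transcribe the INPUT dicts (built from the association lists with
-- Python's duplicate-key overwrite), the f-string key, the sort key int(playId), the possession lookup,
-- and the game_plays grouping loop, which is the identical three-line loop in both Python sources.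
def pvKey (g p : String) : String := PySem.Str.join "_" [g, p]

def pvDictPD (player_data : List (String × String × List (String × String))) : PySem.Dict (String × String) (List (String × String)) :=
  PySem.Dict.ofList (player_data.map (fun t => ((t.1, t.2.1), t.2.2)))

def pvDictPI (plays_info : List (String × String × String × String)) : PySem.Dict (String × String) (String × String) :=
  PySem.Dict.ofList (plays_info.map (fun t => ((t.1, t.2.1), (t.2.2.1, t.2.2.2))))

-- key=int(x); exact under Pre_ (int(playId) parses)
def pvSortKey (p : String) : Int := (PySem.Int.ofStr? p).getD 0

-- plays_info[(gameId, playId)][0]; the key is always present when playId comes from pi's keys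
def pvPoss (pi : PySem.Dict (String × String) (String × String)) (g p : String) : String :=
  (pi.getD (g, p) ("", "")).1

-- game_plays = defaultdict(list); for (gameId, playId) in plays_info.keys(): game_plays[gameId].append(playId)
def pvGamePlays (pi : PySem.Dict (String × String) (String × String)) : PySem.Dict String (List String) :=
  pi.keys.foldl (fun d k => d.modify k.1 [] (fun v => v ++ [k.2])) PySem.Dict.empty

-- ===== PORT A =====
-- inner 'for nflId, teamAbbr in players' loop: state = (player_continuity, current_continuity)
def pvStepPlayersA (g : String)
    (st : PySem.Dict (String × String) Int × PySem.Dict String Int) (pl : String × String) :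
    PySem.Dict (String × String) Int × PySem.Dict String Int :=
  let key := (g, pl.1)
  let c : Int := if st.1.contains key then st.1.getD key 0 + 1 else 1
  (st.1.insert key c, st.2.insert pl.1 c)

-- body of 'for playId in game_plays[gameId]': state = (final_result, player_continuity, prev_possession_team)
def pvStepPlayA (pd : PySem.Dict (String × String) (List (String × String)))
    (pi : PySem.Dict (String × String) (String × String)) (g : String)
    (st : PySem.Dict String (PySem.Dict String Int) × PySem.Dict (String × String) Int × PySem.Dict String (Option String))
    (p : String) :
    PySem.Dict String (PySem.Dict String Int) × PySem.Dict (String × String) Int × PySem.Dict String (Option String) :=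
  let poss := pvPoss pi g p
  let players := pd.getD (g, p) []
  let pc := if st.2.2.getD g none ≠ some poss then PySem.Dict.empty else st.2.1
  let r := players.foldl (pvStepPlayersA g) (pc, PySem.Dict.empty)
  (st.1.insert (pvKey g p) r.2, r.1, st.2.2.insert g (some poss))

def calculate_continuity (player_data : List (String × String × List (String × String))) (plays_info : List (String × String × String × String)) : List (String × List (String × Int)) :=
  let pd := pvDictPD player_data
  let pi := pvDictPI plays_info
  let gp0 := pvGamePlays pi
  -- for gameId in game_plays: game_plays[gameId].sort(key=lambda x: int(x))
  let gp := gp0.keys.foldl (fun d gm => d.modify gm [] (fun v => PySem.List.sorted v pvSortKey false)) gp0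
  -- for gameId in game_plays: clear(); prev[gameId] = None; for playId in game_plays[gameId]: …
  let r := gp.keys.foldl
    (fun st gm => (gp.getD gm []).foldl (pvStepPlayA pd pi gm) (st.1, PySem.Dict.empty, st.2.2.insert gm none))
    ((PySem.Dict.empty : PySem.Dict String (PySem.Dict String Int)),
     (PySem.Dict.empty : PySem.Dict (String × String) Int),
     (PySem.Dict.empty : PySem.Dict String (Option String)))
  r.1.items.map (fun q => (q.1, q.2.items))

-- ===== PORT B =====
-- _segments: the outer while peels one maximal run (inner while scans it) off the front of rest
def pvSegments (pi : PySem.Dict (String × String) (String × String)) (g : String) :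
    List String → List (List String)
  | [] => []
  | p :: t =>
    let poss := pvPoss pi g p
    (p :: t.takeWhile (fun q => pvPoss pi g q == poss)) ::
      pvSegments pi g (t.dropWhile (fun q => pvPoss pi g q == poss))
  termination_by l => l.length
  decreasing_by simpa using Nat.lt_succ_of_le (List.length_dropWhile_le _ _)

-- 'for nflId, _teamAbbr in player_data.get(...)': state = (counts, current)
def pvStepPlayerB (st : PySem.Dict String Int × PySem.Dict String Int) (pl : String × String) :
    PySem.Dict String Int × PySem.Dict String Int :=
  let c := st.1.getD pl.1 0 + 1
  (st.1.insert pl.1 c, st.2.insert pl.1 c)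

-- 'for playId in seg': state = (final_result, counts)
def pvStepPlayB (pd : PySem.Dict (String × String) (List (String × String))) (g : String)
    (st : PySem.Dict String (PySem.Dict String Int) × PySem.Dict String Int) (p : String) :
    PySem.Dict String (PySem.Dict String Int) × PySem.Dict String Int :=
  let r := (pd.getD (g, p) []).foldl pvStepPlayerB (st.2, PySem.Dict.empty)
  (st.1.insert (pvKey g p) r.2, r.1)

def calculate_continuity_alt (player_data : List (String × String × List (String × String))) (plays_info : List (String × String × String × String)) : List (String × List (String × Int)) :=
  let pd := pvDictPD player_data
  let pi := pvDictPI plays_info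
  let gp := pvGamePlays pi
  let fr := gp.items.foldl
    (fun fr gps =>
      let ps := PySem.List.sorted gps.2 pvSortKey false
      (pvSegments pi gps.1 ps).foldl
        (fun fr seg => (seg.foldl (pvStepPlayB pd gps.1) (fr, PySem.Dict.empty)).1) fr)
    (PySem.Dict.empty : PySem.Dict String (PySem.Dict String Int))
  fr.items.map (fun q => (q.1, q.2.items))

-- ===== PRECONDITION & SPEC =====
-- Pre_ excludes exactly the inputs on which A raises: some playId in plays_info for which
-- int(playId) raises ValueError in the sort key (B raises there too).
def Pre_calculate_continuity (player_data : List (String × String × List (String × String))) (plays_info : List (String × String × String × String)) : Prop :=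
  ∀ t ∈ plays_info, (PySem.Int.ofStr? t.2.1).isSome = true
instance (player_data : List (String × String × List (String × String))) (plays_info : List (String × String × String × String)) : Decidable (Pre_calculate_continuity player_data plays_info) := by unfold Pre_calculate_continuity; infer_instance

def pvWitness_calculate_continuity : (List (String × String × List (String × String))) × (List (String × String × String × String)) :=
  ([("g1", "2", [("77", "KC"), ("12", "KC")]), ("g1", "1", [("77", "KC")])],
   [("g1", "1", "KC", "SF"), ("g1", "2", "KC", "SF"), ("g1", "3", "SF", "KC")])

def Spec_calculate_continuity (player_data : List (String × String × List (String × String))) (plays_info : List (String × String × String × String)) (out : List (String × List (String × Int))) : Prop := out = calculate_continuity_alt player_data plays_info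
instance (player_data : List (String × String × List (String × String))) (plays_info : List (String × String × String × String)) (out : List (String × List (String × Int))) : Decidable (Spec_calculate_continuity player_data plays_info out) := by unfold Spec_calculate_continuity; infer_instance

-- ===== CLAIM (what is proved, stated in full; the proofs are below) =====
def Claim_equal_calculate_continuity : Prop := ∀ (player_data : List (String × String × List (String × String))) (plays_info : List (String × String × String × String)), Dom_calculate_continuity player_data plays_info → Pre_calculate_continuity player_data plays_info → Spec_calculate_continuity player_data plays_info (calculate_continuity player_data plays_info)

-- ===== LEMMAS AND PROOFS =====

-- A keys its running dict by (gameId, nflId); within one game that is B's nflId-keyed dict with keys lifted.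
def pvLift (g : String) (d : PySem.Dict String Int) : PySem.Dict (String × String) Int :=
  PySem.Dict.mk (d.items.map (fun q => ((g, q.1), q.2)))

theorem pvPairBeq (g a n : String) : ((g, a) == (g, n)) = (a == n) := by
  simp only [beq_eq_beq, Prod.mk.injEq, true_and]

theorem pvLift_contains (g n : String) (d : PySem.Dict String Int) :
    (pvLift g d).contains (g, n) = d.contains n := by
  simp [pvLift, PySem.Dict.contains, List.any_map, Function.comp_def, pvPairBeq]

theorem pvLift_get? (g n : String) (d : PySem.Dict String Int) :
    (pvLift g d).get? (g, n) = d.get? n := by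
  obtain ⟨l⟩ := d
  induction l with
  | nil => rfl
  | cons h t ih =>
      simp only [pvLift, PySem.Dict.get?, List.map_cons, List.find?_cons, pvPairBeq] at *
      cases hb : (h.1 == n) <;> simp [hb] at * <;> simpa using ih

theorem pvLift_getD (g n : String) (d : PySem.Dict String Int) (v : Int) :
    (pvLift g d).getD (g, n) v = d.getD n v := by
  simp [PySem.Dict.getD, pvLift_get?]

theorem pvLift_insert (g n : String) (d : PySem.Dict String Int) (c : Int) :
    (pvLift g d).insert (g, n) c = pvLift g (d.insert n c) := by
  obtain ⟨l⟩ := d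
  simp only [PySem.Dict.insert, pvLift_contains]
  by_cases hc : (PySem.Dict.mk l).contains n = true
  · simp only [hc, if_true, pvLift]
    congr 1
    simp only [List.map_map]
    apply List.map_congr_left
    intro q _
    by_cases hq : q.1 = n <;> simp [hq]
  · simp only [Bool.not_eq_true] at hc
    simp [hc, pvLift]

theorem pvStepEq (g : String) (counts cur : PySem.Dict String Int) (pl : String × String) :
    pvStepPlayersA g (pvLift g counts, cur) pl
      = ((pvLift g (pvStepPlayerB (counts, cur) pl).1), (pvStepPlayerB (counts, cur) pl).2) := by
  simp only [pvStepPlayersA, pvStepPlayerB, pvLift_contains, pvLift_getD, pvLift_insert]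
  by_cases hc : counts.contains pl.1 = true
  · simp [hc]
  · simp only [Bool.not_eq_true] at hc
    simp [hc, PySem.Dict.getD_of_not_contains _ _ hc]

theorem pvPlayersAB (g : String) (players : List (String × String))
    (counts cur : PySem.Dict String Int) :
    players.foldl (pvStepPlayersA g) (pvLift g counts, cur)
      = ((pvLift g (players.foldl pvStepPlayerB (counts, cur)).1),
         (players.foldl pvStepPlayerB (counts, cur)).2) := by
  induction players generalizing counts cur with
  | nil => rfl
  | cons h t ih =>
      simp only [List.foldl_cons, pvStepEq]
      exact ih _ _

-- one play inside a run: prev equals this play's possessionTeam, so no clear happens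
theorem pvPlayAB (pd : PySem.Dict (String × String) (List (String × String)))
    (pi : PySem.Dict (String × String) (String × String)) (g P p : String)
    (hp : pvPoss pi g p = P)
    (fr : PySem.Dict String (PySem.Dict String Int)) (counts : PySem.Dict String Int)
    (prevd : PySem.Dict String (Option String)) (hprev : prevd.getD g none = some P) :
    pvStepPlayA pd pi g (fr, pvLift g counts, prevd) p
      = ((pvStepPlayB pd g (fr, counts) p).1,
         pvLift g (pvStepPlayB pd g (fr, counts) p).2,
         prevd.insert g (some P)) := by
  simp only [pvStepPlayA, pvStepPlayB, hp, hprev, ne_eq, not_true_eq_false, if_neg,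
    not_false_eq_true, pvPlayersAB]

-- the first play of a run: prev differs, so player_continuity is cleared
theorem pvPlayClearAB (pd : PySem.Dict (String × String) (List (String × String)))
    (pi : PySem.Dict (String × String) (String × String)) (g p : String)
    (fr : PySem.Dict String (PySem.Dict String Int)) (pc : PySem.Dict (String × String) Int)
    (prevd : PySem.Dict String (Option String))
    (hprev : prevd.getD g none ≠ some (pvPoss pi g p)) :
    pvStepPlayA pd pi g (fr, pc, prevd) p
      = ((pvStepPlayB pd g (fr, PySem.Dict.empty) p).1,
         pvLift g (pvStepPlayB pd g (fr, PySem.Dict.empty) p).2,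
         prevd.insert g (some (pvPoss pi g p))) := by
  have h0 : (PySem.Dict.empty : PySem.Dict (String × String) Int)
      = pvLift g PySem.Dict.empty := rfl
  simp only [pvStepPlayA, pvStepPlayB, if_pos hprev, h0, pvPlayersAB]

theorem pvSegAB (pd : PySem.Dict (String × String) (List (String × String)))
    (pi : PySem.Dict (String × String) (String × String)) (g P : String)
    (seg : List String) (hseg : ∀ p ∈ seg, pvPoss pi g p = P) :
    ∀ (fr : PySem.Dict String (PySem.Dict String Int)) (counts : PySem.Dict String Int)
      (prevd : PySem.Dict String (Option String)), prevd.getD g none = some P →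
    (seg.foldl (pvStepPlayA pd pi g) (fr, pvLift g counts, prevd)).1
        = (seg.foldl (pvStepPlayB pd g) (fr, counts)).1
      ∧ (seg.foldl (pvStepPlayA pd pi g) (fr, pvLift g counts, prevd)).2.1
        = pvLift g (seg.foldl (pvStepPlayB pd g) (fr, counts)).2
      ∧ (seg.foldl (pvStepPlayA pd pi g) (fr, pvLift g counts, prevd)).2.2.getD g none = some P := by
  induction seg with
  | nil => exact fun fr counts prevd h => ⟨rfl, rfl, h⟩
  | cons p t ih =>
      intro fr counts prevd hprev
      simp only [List.foldl_cons,
        pvPlayAB pd pi g P p (hseg p (List.mem_cons_self)) fr counts prevd hprev]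
      exact ih (fun q hq => hseg q (List.mem_cons_of_mem _ hq)) _ _ _
        (by rw [PySem.Dict.getD_insert_self])

theorem pvGameAux (pd : PySem.Dict (String × String) (List (String × String)))
    (pi : PySem.Dict (String × String) (String × String)) (g : String) (n : Nat) :
    ∀ (ps : List String), ps.length ≤ n →
    ∀ (fr : PySem.Dict String (PySem.Dict String Int)) (pc : PySem.Dict (String × String) Int)
      (prevd : PySem.Dict String (Option String)),
    (∀ q, ps.head? = some q → prevd.getD g none ≠ some (pvPoss pi g q)) →
    (ps.foldl (pvStepPlayA pd pi g) (fr, pc, prevd)).1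
      = (pvSegments pi g ps).foldl
          (fun fr seg => (seg.foldl (pvStepPlayB pd g) (fr, PySem.Dict.empty)).1) fr := by
  induction n with
  | zero =>
      intro ps hps fr pc prevd _
      have : ps = [] := List.eq_nil_of_length_eq_zero (Nat.le_zero.mp hps)
      subst this
      simp [pvSegments]
  | succ n ih =>
      intro ps hps fr pc prevd hne
      match ps with
      | [] => simp [pvSegments]
      | p :: t =>
        have hclr := pvPlayClearAB pd pi g p fr pc prevd (hne p rfl)
        have hseg : ∀ q ∈ t.takeWhile (fun q => pvPoss pi g q == pvPoss pi g p),
            pvPoss pi g q = pvPoss pi g p := by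
          intro q hq
          simpa using List.mem_takeWhile_imp hq
        obtain ⟨e1, e2, e3⟩ := pvSegAB pd pi g (pvPoss pi g p)
          (t.takeWhile (fun q => pvPoss pi g q == pvPoss pi g p)) hseg
          (pvStepPlayB pd g (fr, PySem.Dict.empty) p).1
          (pvStepPlayB pd g (fr, PySem.Dict.empty) p).2
          (prevd.insert g (some (pvPoss pi g p)))
          (by rw [PySem.Dict.getD_insert_self])
        rw [List.foldl_cons, hclr]
        conv_rhs => rw [pvSegments]
        simp only [List.foldl_cons]
        conv_lhs => rw [← List.takeWhile_append_dropWhile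
          (p := fun q => pvPoss pi g q == pvPoss pi g p) (l := t), List.foldl_append]
        have hrsplit :
            (List.foldl (pvStepPlayA pd pi g)
              ((pvStepPlayB pd g (fr, PySem.Dict.empty) p).1,
               pvLift g (pvStepPlayB pd g (fr, PySem.Dict.empty) p).2,
               prevd.insert g (some (pvPoss pi g p)))
              (t.takeWhile (fun q => pvPoss pi g q == pvPoss pi g p)))
            = (_, _, _) := rfl
        rw [hrsplit, e1, e2]
        have hlen : (t.dropWhile (fun q => pvPoss pi g q == pvPoss pi g p)).length ≤ n := by
          have h1 := List.length_dropWhile_le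
            (fun q => pvPoss pi g q == pvPoss pi g p) t
          have h2 : t.length + 1 ≤ n + 1 := by simpa using hps
          omega
        have hne' : ∀ q,
            (t.dropWhile (fun q => pvPoss pi g q == pvPoss pi g p)).head? = some q →
            (List.foldl (pvStepPlayA pd pi g)
              ((pvStepPlayB pd g (fr, PySem.Dict.empty) p).1,
               pvLift g (pvStepPlayB pd g (fr, PySem.Dict.empty) p).2,
               prevd.insert g (some (pvPoss pi g p)))
              (t.takeWhile (fun q => pvPoss pi g q == pvPoss pi g p))).2.2.getD g none
            ≠ some (pvPoss pi g q) := by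
          intro q hq
          have hpq := List.head?_dropWhile_not
            (fun q => pvPoss pi g q == pvPoss pi g p) t
          rw [hq] at hpq
          simp only [beq_eq_false_iff_ne, ne_eq] at hpq
          rw [e3]
          simpa using fun h => hpq h.symm
        rw [ih _ hlen _ (pvLift g (List.foldl (pvStepPlayB pd g)
            ((pvStepPlayB pd g (fr, PySem.Dict.empty) p).1,
             (pvStepPlayB pd g (fr, PySem.Dict.empty) p).2)
            (t.takeWhile (fun q => pvPoss pi g q == pvPoss pi g p))).2) _ hne']

theorem pvGameAB (pd : PySem.Dict (String × String) (List (String × String)))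
    (pi : PySem.Dict (String × String) (String × String)) (g : String)
    (ps : List String) (fr : PySem.Dict String (PySem.Dict String Int))
    (pc : PySem.Dict (String × String) Int) (prevd : PySem.Dict String (Option String))
    (hne : ∀ q, ps.head? = some q → prevd.getD g none ≠ some (pvPoss pi g q)) :
    (ps.foldl (pvStepPlayA pd pi g) (fr, pc, prevd)).1
      = (pvSegments pi g ps).foldl
          (fun fr seg => (seg.foldl (pvStepPlayB pd g) (fr, PySem.Dict.empty)).1) fr :=
  pvGameAux pd pi g ps.length ps le_rfl fr pc prevd hne

-- the modify-each-key-once loop, pointwise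
theorem pvFoldlModifyGetD {ν : Type} (f : ν → ν) (d0 : ν) (l : List String)
    (hl : l.Nodup) (d : PySem.Dict String ν) (x : String) :
    (l.foldl (fun d k => d.modify k d0 f) d).getD x d0
      = if x ∈ l then f (d.getD x d0) else d.getD x d0 := by
  induction l generalizing d with
  | nil => simp
  | cons k t ih =>
      simp only [List.foldl_cons, List.mem_cons]
      rw [ih (by simpa using hl.of_cons) _]
      by_cases hx : x ∈ t
      · have hxk : x ≠ k := by
          rintro rfl
          exact (List.nodup_cons.mp hl).1 hx
        simp [hx, PySem.Dict.getD_modify, hxk]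
      · by_cases hxk : x = k
        · subst hxk
          have hk : x ∉ t := (List.nodup_cons.mp hl).1
          simp [hx, hk]
        · simp [hx, hxk, PySem.Dict.getD_modify]

theorem pvFoldlModifyKeys {ν : Type} (f : ν → ν) (d0 : ν) (l : List String)
    (d : PySem.Dict String ν) (hl : ∀ k ∈ l, d.contains k = true) :
    (l.foldl (fun d k => d.modify k d0 f) d).keys = d.keys := by
  induction l generalizing d with
  | nil => rfl
  | cons k t ih =>
      simp only [List.foldl_cons]
      rw [ih]
      · rw [PySem.Dict.keys_modify, PySem.Dict.keys_insert_of_contains _ _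
          (hl k List.mem_cons_self)]
      · intro k' hk'
        rw [PySem.Dict.contains_modify]
        simp [hl k' (List.mem_cons_of_mem _ hk')]

theorem pvOuterAB (pd : PySem.Dict (String × String) (List (String × String)))
    (pi : PySem.Dict (String × String) (String × String))
    (gp : PySem.Dict String (List String)) (l : List String)
    (hgp : ∀ gm ∈ l, gp.getD gm [] = PySem.List.sorted ((pvGamePlays pi).getD gm []) pvSortKey false) :
    ∀ (fr : PySem.Dict String (PySem.Dict String Int)) (pc : PySem.Dict (String × String) Int)
      (prevd : PySem.Dict String (Option String)),
    (l.foldl (fun st gm => (gp.getD gm []).foldl (pvStepPlayA pd pi gm) (st.1, PySem.Dict.empty, st.2.2.insert gm none)) (fr, pc, prevd)).1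
      = l.foldl (fun fr gm =>
          (pvSegments pi gm (PySem.List.sorted ((pvGamePlays pi).getD gm []) pvSortKey false)).foldl
            (fun fr seg => (seg.foldl (pvStepPlayB pd gm) (fr, PySem.Dict.empty)).1) fr) fr := by
  induction l with
  | nil => intro fr pc prevd; rfl
  | cons g t ih =>
      intro fr pc prevd
      simp only [List.foldl_cons]
      set ps := gp.getD g [] with hps
      set st1 := ps.foldl (pvStepPlayA pd pi g) (fr, PySem.Dict.empty, prevd.insert g none) with hst1
      have h1 : st1.1 = (pvSegments pi g (PySem.List.sorted ((pvGamePlays pi).getD g []) pvSortKey false)).foldl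
          (fun fr seg => (seg.foldl (pvStepPlayB pd g) (fr, PySem.Dict.empty)).1) fr := by
        rw [hst1, hps, hgp g List.mem_cons_self]
        exact pvGameAB pd pi g _ fr _ _
          (fun q _ => by simp [PySem.Dict.getD_insert_self])
      have hsplit : st1 = (st1.1, st1.2.1, st1.2.2) := rfl
      rw [hsplit, ih (fun gm hgm => hgp gm (List.mem_cons_of_mem _ hgm)), h1]

-- ===== VERDICT (by name: the statement is the Claim_ definition above) =====
theorem calculate_continuity_spec : Claim_equal_calculate_continuity := by
  intro player_data plays_info _ _
  unfold Spec_calculate_continuity calculate_continuity calculate_continuity_alt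
  have hnd : (pvGamePlays (pvDictPI plays_info)).keys.Nodup := by
    unfold pvGamePlays
    exact PySem.Dict.nodup_keys_foldl_modify_key _ Prod.fst []
      (fun _ k v => v ++ [k.2]) _ PySem.Dict.nodup_keys_empty
  have hkeys : ((pvGamePlays (pvDictPI plays_info)).keys.foldl
      (fun d gm => d.modify gm [] (fun v => PySem.List.sorted v pvSortKey false))
      (pvGamePlays (pvDictPI plays_info))).keys = (pvGamePlays (pvDictPI plays_info)).keys :=
    pvFoldlModifyKeys _ _ _ _
      (fun k hk => (PySem.Dict.contains_iff_mem_keys _ _).mpr hk)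
  have hget : ∀ gm ∈ (pvGamePlays (pvDictPI plays_info)).keys,
      ((pvGamePlays (pvDictPI plays_info)).keys.foldl
        (fun d gm => d.modify gm [] (fun v => PySem.List.sorted v pvSortKey false))
        (pvGamePlays (pvDictPI plays_info))).getD gm []
      = PySem.List.sorted ((pvGamePlays (pvDictPI plays_info)).getD gm []) pvSortKey false := by
    intro gm hm
    rw [pvFoldlModifyGetD _ _ _ hnd]
    simp [hm]
  simp only []
  rw [hkeys]
  rw [pvOuterAB (pvDictPD player_data) (pvDictPI plays_info) _ _ hget]
  rw [PySem.Dict.items_eq_map_keys (pvGamePlays (pvDictPI plays_info)) hnd ([] : List String),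
    List.foldl_map]
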